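-- pv_equiv track=rewrite | github.com/Noopgupta/MiscLearning | Python/PlayerIBMCoding.py | playSegments
-- ===== SOURCE A (Python) =====
-- def playSegments(coins):
--     # Write your code here
--     # [1,1,1,0,1]
--
--     player1_score = 0
--     player2_score = 0
--     play_times = 0
--     coins_len = len(coins)
--
--     for play_times in range(coins_len):
--         player1_score = 0
--         player2_score = 0
--         for i in range(coins_len):
--             if play_times == 0:
--                 player1_score = 0
--                 if coins[i] == 1:
--                     player2_score += 1
--                 else:
--                     player2_score -= 1
--
--
-- # 1, 0-4
--             if play_times > 0:
--                 if i < play_times: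
--                     if coins[i] == 1:
--                         player1_score += 1
--                     else:
--                         player1_score -= 1
--                 else:
--                     if coins[i] == 1:
--                         player2_score += 1
--                     else:
--                         player2_score -= 1
--
--         if player1_score > player2_score:
--             return play_times
--             break
-- ===== SOURCE B (Python) =====
-- def playSegments(coins):
--     # One pass: total score once, then move coins from right side to left side.
--     total = 0
--     for c in coins:
--         total += 1 if c == 1 else -1
--     left = 0
--     right = total
--     for k, c in enumerate(coins):
--         if left > right:
--             return k
--         d = 1 if c == 1 else -1
--         left += d
--         right -= d
--     return None
-- ===== Notes on version B (the rewrite author's own statement) =====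
-- stated objective: faster
-- what changed: Replaces the nested rescan of all coins for every candidate split with a single pass that computes the total score once and updates the left/right scores incrementally.
import Mathlib
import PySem

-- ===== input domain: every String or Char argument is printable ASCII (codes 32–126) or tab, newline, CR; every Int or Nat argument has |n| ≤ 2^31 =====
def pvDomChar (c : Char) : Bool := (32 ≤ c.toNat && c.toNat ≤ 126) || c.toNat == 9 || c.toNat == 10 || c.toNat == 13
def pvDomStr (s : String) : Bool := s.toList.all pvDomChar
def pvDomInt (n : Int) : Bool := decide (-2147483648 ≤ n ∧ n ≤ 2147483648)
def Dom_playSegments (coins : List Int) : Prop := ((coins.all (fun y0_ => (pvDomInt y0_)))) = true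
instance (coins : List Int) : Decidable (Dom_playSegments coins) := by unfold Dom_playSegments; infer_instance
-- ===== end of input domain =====

-- B replaces A's full rescan of all coins for every candidate split by one pass
-- with incremental left/right scores (objective: faster).

-- ===== PORT A =====
-- inner 'for i in range(coins_len)' loop of A, for a fixed play_times; state = (player1_score, player2_score)
def pySegInner (coins : List Int) (play_times : Int) : Int × Int :=
  (PySem.List.pyRange 0 (PySem.List.len coins) 1).foldl
    (fun st i =>
      let st1 :=
        if play_times = 0 then
          (0, if PySem.List.pyGetD coins i 0 = 1 then st.2 + 1 else st.2 - 1)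
        else st
      if play_times > 0 then
        if i < play_times then
          (if PySem.List.pyGetD coins i 0 = 1 then st1.1 + 1 else st1.1 - 1, st1.2)
        else
          (st1.1, if PySem.List.pyGetD coins i 0 = 1 then st1.2 + 1 else st1.2 - 1)
      else st1)
    (0, 0)

-- outer 'for play_times in range(coins_len)' loop of A, with its early return
def pySegOuter (coins : List Int) : List Int → Option Int
  | [] => none
  | pt :: rest =>
    let st := pySegInner coins pt
    if st.1 > st.2 then some pt else pySegOuter coins rest

def playSegments (coins : List Int) : Option Int :=
  pySegOuter coins (PySem.List.pyRange 0 (PySem.List.len coins) 1)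

-- ===== PORT B =====
-- B's 'for k, c in enumerate(coins)' loop: left/right scores updated incrementally
def altGo : List Int → Int → Int → Int → Option Int
  | [], _, _, _ => none
  | c :: rest, left, right, k =>
    if left > right then some k
    else
      let d : Int := if c = 1 then 1 else -1
      altGo rest (left + d) (right - d) (k + 1)

def playSegments_alt (coins : List Int) : Option Int :=
  let total := coins.foldl (fun s c => s + (if c = 1 then 1 else -1)) 0
  altGo coins 0 total 0

-- ===== PRECONDITION & SPEC =====
def Spec_playSegments (coins : List Int) (out : Option Int) : Prop := out = playSegments_alt coins
instance (coins : List Int) (out : Option Int) : Decidable (Spec_playSegments coins out) := by unfold Spec_playSegments; infer_instance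

-- ===== CLAIM (what is proved, stated in full; the proofs are below) =====
def Claim_equal_playSegments : Prop := ∀ (coins : List Int), Dom_playSegments coins → Spec_playSegments coins (playSegments coins)

-- ===== LEMMAS AND PROOFS =====

-- the ±1 score A computes for a segment of coins (in A's if-branch shape)
def pvScore (l : List Int) : Int := l.foldl (fun s c => if c = 1 then s + 1 else s - 1) 0

theorem pvScore_shift (l : List Int) : ∀ (s : Int),
    l.foldl (fun s c => if c = 1 then s + 1 else s - 1) s = s + pvScore l := by
  unfold pvScore
  induction l with
  | nil => intro s; simp
  | cons c rest ih =>
    intro s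
    simp only [List.foldl_cons]
    rw [ih, ih (if c = 1 then (0:Int) + 1 else 0 - 1)]
    split_ifs <;> ring

theorem pvScore_cons (c : Int) (l : List Int) :
    pvScore (c :: l) = (if c = 1 then 1 else -1) + pvScore l := by
  have h := pvScore_shift l (if c = 1 then (0:Int) + 1 else 0 - 1)
  simp only [pvScore, List.foldl_cons]
  rw [h]
  show _ = (if c = 1 then (1:Int) else -1) + pvScore l
  split_ifs <;> ring

theorem pvScore_append_singleton (pre : List Int) (c : Int) :
    pvScore (pre ++ [c]) = pvScore pre + (if c = 1 then 1 else -1) := by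
  simp only [pvScore, List.foldl_append, List.foldl_cons, List.foldl_nil]
  show (if c = 1 then pre.foldl _ 0 + 1 else pre.foldl _ 0 - 1) = _
  split_ifs <;> ring

theorem pvScore_eq_total (l : List Int) :
    l.foldl (fun s c => s + (if c = 1 then 1 else -1)) 0 = pvScore l := by
  have h : ∀ (acc : Int), ∀ x ∈ l,
      acc + (if x = 1 then (1:Int) else -1) = (if x = 1 then acc + 1 else acc - 1) := by
    intro acc x _; split_ifs <;> ring
  rw [PySem.List.foldl_congr_mem l (fun s c => s + (if c = 1 then 1 else -1))
      (fun s c => if c = 1 then s + 1 else s - 1) 0 h]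
  rfl

-- fold shapes of A's inner loop, one component at a time
theorem foldl_fst_only (l : List Int) : ∀ (s t : Int),
    l.foldl (fun (st : Int × Int) c => (if c = 1 then st.1 + 1 else st.1 - 1, st.2)) (s, t)
      = (s + pvScore l, t) := by
  induction l with
  | nil => intro s t; simp [pvScore]
  | cons c rest ih =>
    intro s t
    simp only [List.foldl_cons, ih, pvScore_cons, Prod.mk.injEq, and_true]
    split_ifs <;> ring

theorem foldl_snd_only (l : List Int) : ∀ (s t : Int),
    l.foldl (fun (st : Int × Int) c => (st.1, if c = 1 then st.2 + 1 else st.2 - 1)) (s, t)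
      = (s, t + pvScore l) := by
  induction l with
  | nil => intro s t; simp [pvScore]
  | cons c rest ih =>
    intro s t
    simp only [List.foldl_cons, ih, pvScore_cons, Prod.mk.injEq, true_and]
    split_ifs <;> ring

theorem foldl_zero_snd (l : List Int) : ∀ (t : Int),
    l.foldl (fun (st : Int × Int) c => ((0:Int), if c = 1 then st.2 + 1 else st.2 - 1)) (0, t)
      = (0, t + pvScore l) := by
  induction l with
  | nil => intro t; simp [pvScore]
  | cons c rest ih =>
    intro t
    simp only [List.foldl_cons, ih, pvScore_cons, Prod.mk.injEq, true_and]
    split_ifs <;> ring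

-- inner loop characterisation: at split point pre.length, A computes the two segment scores
theorem pySegInner_eq (pre l : List Int) :
    pySegInner (pre ++ l) (pre.length : Int) = (pvScore pre, pvScore l) := by
  cases pre with
  | nil =>
    simp only [pySegInner, List.nil_append, List.length_nil, Nat.cast_zero]
    norm_num
    have hf := PySem.List.foldl_pyRange_zero_pyGetD' l 0
        (fun (st : Int × Int) (c : Int) => ((0:Int), if c = 1 then st.2 + 1 else st.2 - 1))
        ((0:Int), (0:Int))
    refine hf.trans ?_
    exact (foldl_zero_snd l 0).trans (by simp [pvScore])
  | cons p0 pre' =>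
    have hpos : (0:Int) < (((p0 :: pre').length : Nat) : Int) := by
      have h0 : 0 < (p0 :: pre').length := by simp
      exact_mod_cast h0
    have hne : ¬ ((((p0 :: pre').length : Nat) : Int) = 0) := by omega
    set pre := p0 :: pre' with hpre
    have hlen : (pre.length : Int) ≤ PySem.List.len (pre ++ l) := by
      simp [PySem.List.len]
    simp only [pySegInner, if_neg hne, if_pos hpos, gt_iff_lt]
    rw [PySem.List.pyRange_one_append 0 (pre.length : Int) (PySem.List.len (pre ++ l))
        (by positivity) hlen, List.foldl_append]
    -- first segment: indices i < pre.length hit pre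
    rw [PySem.List.foldl_congr_mem _ _
        (fun (st : Int × Int) i =>
          (if PySem.List.pyGetD pre i 0 = 1 then st.1 + 1 else st.1 - 1, st.2)) ((0:Int),(0:Int)) ?hc1]
    case hc1 =>
      intro acc i hi
      rw [PySem.List.mem_pyRange_one] at hi
      have h1 : i < ((pre.length : Nat) : Int) := hi.2
      beta_reduce
      rw [if_pos h1,
        PySem.List.pyGetD_eq_getElem (pre ++ l) 0 hi.1 (by simp; omega),
        PySem.List.pyGetD_eq_getElem pre 0 hi.1 (by exact_mod_cast h1),
        List.getElem_append_left]
    have e1 : (PySem.List.pyRange 0 ((pre.length : Nat) : Int) 1).foldl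
        (fun (st : Int × Int) i =>
          (if PySem.List.pyGetD pre i 0 = 1 then st.1 + 1 else st.1 - 1, st.2)) ((0:Int),(0:Int))
        = (0 + pvScore pre, 0) := by
      rw [show ((pre.length : Nat) : Int) = PySem.List.len pre by simp [PySem.List.len]]
      have hf := PySem.List.foldl_pyRange_zero_pyGetD pre 0
        (fun (st : Int × Int) (c : Int) => (if c = 1 then st.1 + 1 else st.1 - 1, st.2))
        ((0:Int), (0:Int))
      exact hf.trans (foldl_fst_only pre 0 0)
    rw [e1]
    -- second segment: indices i ≥ pre.length hit l
    rw [PySem.List.foldl_congr_mem _ _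
        (fun (st : Int × Int) i =>
          (st.1, if PySem.List.pyGetD (pre ++ l) i 0 = 1 then st.2 + 1 else st.2 - 1))
        ((0:Int) + pvScore pre, (0:Int)) ?hc2]
    case hc2 =>
      intro acc i hi
      rw [PySem.List.mem_pyRange_one] at hi
      beta_reduce
      rw [if_neg (by omega)]
    have e2 : (PySem.List.pyRange ((pre.length : Nat) : Int) (PySem.List.len (pre ++ l)) 1).foldl
        (fun (st : Int × Int) i =>
          (st.1, if PySem.List.pyGetD (pre ++ l) i 0 = 1 then st.2 + 1 else st.2 - 1))
        (0 + pvScore pre, 0) = (0 + pvScore pre, 0 + pvScore l) := by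
      have hf := PySem.List.foldl_pyRange_pyGetD (pre ++ l) 0
        (fun (st : Int × Int) (c : Int) => (st.1, if c = 1 then st.2 + 1 else st.2 - 1))
        ((0:Int) + pvScore pre, (0:Int)) (a := ((pre.length : Nat) : Int)) (by omega)
      refine hf.trans ?_
      rw [show (((pre.length : Nat) : Int)).toNat = pre.length from by omega, List.drop_left]
      exact foldl_snd_only l (0 + pvScore pre) 0
    rw [e2]
    simp

-- outer loop ≙ B's single pass, by induction on the unplayed suffix
theorem outer_eq_altGo (l : List Int) : ∀ (pre : List Int),
    pySegOuter (pre ++ l) (PySem.List.pyRange (pre.length : Int) (PySem.List.len (pre ++ l)) 1)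
      = altGo l (pvScore pre) (pvScore l) (pre.length : Int) := by
  induction l with
  | nil =>
    intro pre
    rw [PySem.List.pyRange_one_eq_nil (by simp [PySem.List.len])]
    rfl
  | cons c rest ih =>
    intro pre
    rw [PySem.List.pyRange_one_cons (by simp only [PySem.List.len_eq, List.length_append, List.length_cons]; push_cast; omega)]
    simp only [pySegOuter, altGo, pySegInner_eq pre (c :: rest)]
    by_cases h : pvScore pre > pvScore (c :: rest)
    · rw [if_pos h, if_pos h]
    · rw [if_neg h, if_neg h]
      have h2 := ih (pre ++ [c])
      rw [List.append_assoc, List.singleton_append] at h2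
      rw [List.length_append, List.length_singleton, Nat.cast_add, Nat.cast_one,
          pvScore_append_singleton] at h2
      rw [show pvScore (c :: rest) - (if c = 1 then (1:Int) else -1) = pvScore rest from by
            rw [pvScore_cons]; ring]
      exact h2

-- ===== VERDICT (by name: the statement is the Claim_ definition above) =====
theorem playSegments_spec : Claim_equal_playSegments := by
  intro coins _
  unfold Spec_playSegments playSegments playSegments_alt
  have h := outer_eq_altGo coins []
  simp only [List.nil_append, List.length_nil, Nat.cast_zero] at h
  rw [h]
  simp only [pvScore_eq_total]
  rfl
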